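-- pv_equiv track=rewrite | github.com/Sumit-Nayek/IBM_Data_Scientist_Hacker_Rank_Test | Solution_2.py | solve_product_twist
-- ===== SOURCE A (Python) =====
-- def solve_product_twist(products):
--     # 1. Map the frequency of each product
--     counts = {}
--     for p in products:
--         counts[p] = counts.get(p, 0) + 1
--
--     # 2. Find the highest occurrence count
--     max_freq = max(counts.values())
--
--     # 3. Collect all strings that appear 'max_freq' times
--     # (e.g., all 4 types if 4 is the max)
--     candidates = [name for name, count in counts.items() if count == max_freq]
--
--     # 4. Sort alphabetically (A to Z)
--     candidates.sort()
--
--     # 5. Return the last one in the sorted list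
--     return candidates[-1]
-- ===== SOURCE B (Python) =====
-- def solve_product_twist(products):
--     counts = {}
--     for p in products:
--         counts[p] = counts.get(p, 0) + 1
--     return max(counts.items(), key=lambda kv: (kv[1], kv[0]))[0]
-- ===== Notes on version B (the rewrite author's own statement) =====
-- stated objective: simpler
-- what changed: B builds the same frequency dict but replaces A's max-frequency pass, candidate-list comprehension, sort, and last-element indexing with a single keyed max over counts.items() using the (count, name) tuple key.
import Mathlib
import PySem

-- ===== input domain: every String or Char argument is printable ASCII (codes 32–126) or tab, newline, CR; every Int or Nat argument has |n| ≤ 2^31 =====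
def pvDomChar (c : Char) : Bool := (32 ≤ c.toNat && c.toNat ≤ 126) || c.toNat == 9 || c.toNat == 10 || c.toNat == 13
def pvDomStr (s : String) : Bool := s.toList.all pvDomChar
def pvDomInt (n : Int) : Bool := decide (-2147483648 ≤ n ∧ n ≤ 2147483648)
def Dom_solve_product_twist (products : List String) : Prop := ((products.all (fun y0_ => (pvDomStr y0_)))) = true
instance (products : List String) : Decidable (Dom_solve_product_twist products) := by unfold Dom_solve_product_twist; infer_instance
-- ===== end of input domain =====

-- B replaces A's max-frequency pass + candidate filter + sort + last-element step with one keyed max over the count dict using the (count, name) tuple key: a simpler selection with the same result.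


-- ===== PORT A =====
def solve_product_twist (products : List String) : String :=
  -- counts = {}; for p in products: counts[p] = counts.get(p, 0) + 1
  let counts : PySem.Dict String Int :=
    products.foldl (fun d p => d.insert p (d.getD p 0 + 1)) PySem.Dict.empty
  -- max_freq = max(counts.values())   (ValueError on the empty list → excluded by Pre_)
  let max_freq : Int := (PySem.List.max? counts.values (fun v => v)).getD 0
  -- candidates = [name for name, count in counts.items() if count == max_freq]
  let candidates : List String :=
    (counts.items.filter (fun kv => kv.2 == max_freq)).map (fun kv => kv.1)
  -- candidates.sort(); return candidates[-1]
  let sortedC := PySem.List.sorted candidates (fun x => x) false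
  (PySem.List.pyGet? sortedC (-1)).getD ""

-- ===== PORT B =====
def solve_product_twist_alt (products : List String) : String :=
  -- same counts loop as in Source B
  let counts : PySem.Dict String Int :=
    products.foldl (fun d p => d.insert p (d.getD p 0 + 1)) PySem.Dict.empty
  -- return max(counts.items(), key=lambda kv: (kv[1], kv[0]))[0]   (ValueError on the empty list → Pre_)
  match PySem.List.max2? counts.items (fun kv => kv.2) (fun kv => kv.1) with
  | some kv => kv.1
  | none => ""

-- ===== PRECONDITION & SPEC =====
-- Both A and B raise ValueError ('max() of an empty sequence') on the empty list; nothing else raises.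
def Pre_solve_product_twist (products : List String) : Prop := products ≠ []
instance (products : List String) : Decidable (Pre_solve_product_twist products) := by unfold Pre_solve_product_twist; infer_instance
def pvWitness_solve_product_twist : List String := (["apple", "pear", "apple"])

def Spec_solve_product_twist (products : List String) (out : String) : Prop := out = solve_product_twist_alt products
instance (products : List String) (out : String) : Decidable (Spec_solve_product_twist products out) := by unfold Spec_solve_product_twist; infer_instance

-- ===== CLAIM (what is proved, stated in full; the proofs are below) =====
def Claim_equal_solve_product_twist : Prop := ∀ (products : List String), Dom_solve_product_twist products → Pre_solve_product_twist products → Spec_solve_product_twist products (solve_product_twist products)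

-- ===== LEMMAS AND PROOFS =====

-- Python's tuple order (count, name) on dict items, as a Prop.
def lexLe (p q : Int × String) : Prop := p.1 < q.1 ∨ (p.1 = q.1 ∧ p.2 ≤ q.2)

theorem lexLe_refl (p : Int × String) : lexLe p p := Or.inr ⟨rfl, le_refl _⟩

theorem lexLe_trans {p q r : Int × String} (h1 : lexLe p q) (h2 : lexLe q r) : lexLe p r := by
  rcases h1 with h1 | ⟨h1, h1'⟩ <;> rcases h2 with h2 | ⟨h2, h2'⟩
  · exact Or.inl (lt_trans h1 h2)
  · exact Or.inl (h2 ▸ h1)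
  · exact Or.inl (h1 ▸ h2)
  · exact Or.inr ⟨h1.trans h2, h1'.trans h2'⟩

-- The step function of PySem.List.max2? at B's keys (kv.2, kv.1), spelled out.
def m2step (acc : Option (String × Int)) (x : String × Int) : Option (String × Int) :=
  match acc with
  | none => some x
  | some m =>
    if (decide (m.2 < x.2) || !decide (x.2 < m.2) && decide (m.1 < x.1)) = true then some x else some m

theorem max2?_eq_foldl (xs : List (String × Int)) :
    PySem.List.max2? xs (fun kv => kv.2) (fun kv => kv.1) = xs.foldl m2step none := by
  unfold PySem.List.max2? m2step
  congr 1
  funext acc x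
  rcases acc with _ | m <;> rfl

theorem m2step_cond (m0 x : String × Int) :
    (decide (m0.2 < x.2) || !decide (x.2 < m0.2) && decide (m0.1 < x.1)) = true ↔
      (m0.2 < x.2 ∨ (¬ x.2 < m0.2 ∧ m0.1 < x.1)) := by
  simp only [Bool.or_eq_true, Bool.and_eq_true, Bool.not_eq_true', decide_eq_true_eq,
    decide_eq_false_iff_not]

theorem m2step_inv : ∀ (xs : List (String × Int)) (m0 : String × Int),
    ∃ m, xs.foldl m2step (some m0) = some m ∧ (m = m0 ∨ m ∈ xs) ∧
      lexLe (m0.2, m0.1) (m.2, m.1) ∧ ∀ y ∈ xs, lexLe (y.2, y.1) (m.2, m.1) := by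
  intro xs
  induction xs with
  | nil => intro m0; exact ⟨m0, rfl, Or.inl rfl, lexLe_refl _, by simp⟩
  | cons x t ih =>
    intro m0
    by_cases hC : m0.2 < x.2 ∨ (¬ x.2 < m0.2 ∧ m0.1 < x.1)
    · -- the accumulator is replaced by x
      have hstep : m2step (some m0) x = some x := by
        simp only [m2step]; rw [if_pos ((m2step_cond m0 x).mpr hC)]
      have hx : lexLe (m0.2, m0.1) (x.2, x.1) := by
        rcases hC with h | ⟨h1, h2⟩
        · exact Or.inl h
        · rcases lt_or_eq_of_le (not_lt.mp h1) with h | h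
          · exact Or.inl h
          · exact Or.inr ⟨h, le_of_lt h2⟩
      obtain ⟨m, hm, hmem, hle, hall⟩ := ih x
      refine ⟨m, ?_, ?_, lexLe_trans hx hle, ?_⟩
      · rw [List.foldl_cons, hstep]; exact hm
      · rcases hmem with h | h
        · exact Or.inr (h ▸ List.mem_cons_self)
        · exact Or.inr (List.mem_cons_of_mem _ h)
      · intro y hy
        rcases List.mem_cons.mp hy with rfl | hy
        · exact hle
        · exact hall y hy
    · -- the accumulator m0 is kept
      have hstep : m2step (some m0) x = some m0 := by
        simp only [m2step]; rw [if_neg (fun hb => hC ((m2step_cond m0 x).mp hb))]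
      have hx : lexLe (x.2, x.1) (m0.2, m0.1) := by
        rw [not_or] at hC
        obtain ⟨h1, h2⟩ := hC
        rcases lt_or_eq_of_le (not_lt.mp h1) with h | h
        · exact Or.inl h
        · refine Or.inr ⟨h, ?_⟩
          rw [not_and] at h2
          exact not_lt.mp (h2 (not_lt.mpr (le_of_eq h.symm)))
      obtain ⟨m, hm, hmem, hle, hall⟩ := ih m0
      refine ⟨m, ?_, ?_, hle, ?_⟩
      · rw [List.foldl_cons, hstep]; exact hm
      · rcases hmem with h | h
        · exact Or.inl h
        · exact Or.inr (List.mem_cons_of_mem _ h)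
      · intro y hy
        rcases List.mem_cons.mp hy with rfl | hy
        · exact lexLe_trans hx hle
        · exact hall y hy

theorem max2?_lex_spec (x0 : String × Int) (xs : List (String × Int)) :
    ∃ m, PySem.List.max2? (x0 :: xs) (fun kv => kv.2) (fun kv => kv.1) = some m ∧
      m ∈ x0 :: xs ∧ ∀ y ∈ x0 :: xs, lexLe (y.2, y.1) (m.2, m.1) := by
  rw [max2?_eq_foldl]
  obtain ⟨m, hm, hmem, hle, hall⟩ := m2step_inv xs x0
  refine ⟨m, ?_, ?_, ?_⟩
  · rw [List.foldl_cons]; exact hm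
  · rcases hmem with h | h
    · exact h ▸ List.mem_cons_self
    · exact List.mem_cons_of_mem _ h
  · intro y hy
    rcases List.mem_cons.mp hy with rfl | hy
    · exact hle
    · exact hall y hy

-- In a list sorted ascending (Pairwise ≤), the last element bounds every element.
theorem le_getLast_of_pairwise : ∀ (l : List String) (h : l ≠ []),
    l.Pairwise (· ≤ ·) → ∀ x ∈ l, x ≤ l.getLast h := by
  intro l
  induction l with
  | nil => intro h; exact absurd rfl h
  | cons a t ih =>
    intro h hp x hx
    cases t with
    | nil =>
      rcases List.mem_cons.mp hx with rfl | hx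
      · simp
      · simp at hx
    | cons b u =>
      rw [List.getLast_cons (by simp)]
      rcases List.mem_cons.mp hx with rfl | hx
      · exact le_trans (List.rel_of_pairwise_cons hp (List.getLast_mem _))
          (le_refl _)
      · exact ih (by simp) hp.of_cons x hx

-- ===== VERDICT (by name: the statement is the Claim_ definition above) =====
theorem solve_product_twist_spec : Claim_equal_solve_product_twist := by
  intro products _ hpre
  unfold Pre_solve_product_twist at hpre
  unfold Spec_solve_product_twist
  unfold solve_product_twist solve_product_twist_alt
  simp only [PySem.Dict.foldl_insert_getD_add_one_eq_counter, PySem.Dict.items_counter,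
    PySem.Dict.values]
  set S := PySem.Set.ofList products with hS
  set cnt : String → Int := fun k => ((List.count k products : Nat) : Int) with hcnt
  -- S is nonempty
  obtain ⟨q, qs⟩ : ∃ x xs, products = x :: xs := by
    cases products with
    | nil => exact absurd rfl hpre
    | cons x xs => exact ⟨x, xs, rfl⟩
  obtain ⟨qs, rfl⟩ := qs
  have hqS : q ∈ S := (PySem.Set.mem_ofList _ _).mpr List.mem_cons_self
  obtain ⟨s0, srest, hScons⟩ : ∃ s0 srest, S = s0 :: srest := by
    cases hs : S with
    | nil => rw [hs] at hqS; simp at hqS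
    | cons s0 srest => exact ⟨s0, srest, rfl⟩
  -- the values list is S.map cnt
  have hvals : (S.map (fun k => (k, cnt k))).map (fun kv => kv.2) = S.map cnt := by
    rw [List.map_map]; rfl
  rw [hvals]
  -- A's max_freq
  obtain ⟨M, hM⟩ : ∃ M, PySem.List.max? (S.map cnt) (fun v => v) = some M := by
    cases hm : PySem.List.max? (S.map cnt) (fun v => v) with
    | none =>
      rw [PySem.List.max?_eq_none_iff] at hm
      rw [hScons] at hm; simp at hm
    | some M => exact ⟨M, rfl⟩
  rw [hM]
  simp only [Option.getD_some]
  have hMmax : ∀ k ∈ S, cnt k ≤ M := by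
    intro k hk
    exact PySem.List.max?_isMax hM (cnt k) (List.mem_map.mpr ⟨k, hk, rfl⟩)
  obtain ⟨kM, hkMS, hkM⟩ : ∃ kM ∈ S, cnt kM = M := by
    obtain ⟨kM, hkMS, hkM⟩ := List.mem_map.mp (PySem.List.max?_mem hM)
    exact ⟨kM, hkMS, hkM⟩
  -- A's candidate list
  set C : List String :=
    ((S.map (fun k => (k, cnt k))).filter (fun kv => kv.2 == M)).map (fun kv => kv.1) with hCdef
  have hCmem : ∀ x, x ∈ C ↔ x ∈ S ∧ cnt x = M := by
    intro x
    simp only [hCdef, List.mem_map, List.mem_filter, beq_iff_eq]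
    constructor
    · rintro ⟨kv, ⟨⟨k, hkS, rfl⟩, hkv2⟩, rfl⟩
      exact ⟨hkS, hkv2⟩
    · rintro ⟨hxS, hx2⟩
      exact ⟨(x, cnt x), ⟨⟨x, hxS, rfl⟩, hx2⟩, rfl⟩
  have hCne : C ≠ [] := by
    intro hnil
    have := (hCmem kM).mpr ⟨hkMS, hkM⟩
    rw [hnil] at this; simp at this
  -- A's sorted candidates and its last element
  set sortedC := PySem.List.sorted C (fun x => x) false with hsorted
  have hSCne : sortedC ≠ [] := by
    intro hnil
    exact hCne ((PySem.List.sorted_eq_nil_iff C _ _).mp hnil)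
  set a := sortedC.getLast hSCne with ha
  have hA : (PySem.List.pyGet? sortedC (-1)).getD "" = a := by
    rw [PySem.List.pyGet?_neg_one, List.getLast?_eq_some_getLast hSCne]; rfl
  rw [hA]
  have haC : a ∈ C := (PySem.List.mem_sorted C _ _ a).mp (List.getLast_mem hSCne)
  have haMax : ∀ y ∈ C, y ≤ a := by
    intro y hy
    exact le_getLast_of_pairwise sortedC hSCne
      (PySem.List.sorted_pairwise C (fun x => x)) y ((PySem.List.mem_sorted C _ _ y).mpr hy)
  obtain ⟨haS, haM⟩ := (hCmem a).mp haC
  -- B's keyed max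
  rw [hScons, List.map_cons]
  obtain ⟨m, hm, hmmem, hmall⟩ :=
    max2?_lex_spec (s0, cnt s0) (srest.map (fun k => (k, cnt k)))
  rw [hm]
  -- m is (kb, cnt kb) for some kb ∈ S
  obtain ⟨kb, hkbS, hkb⟩ : ∃ kb ∈ S, m = (kb, cnt kb) := by
    have : m ∈ S.map (fun k => (k, cnt k)) := by
      rw [hScons, List.map_cons]; exact hmmem
    obtain ⟨kb, hkbS, hkbeq⟩ := List.mem_map.mp this
    exact ⟨kb, hkbS, hkbeq.symm⟩
  -- compare a with kb via the lex property at y = (a, cnt a)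
  have hya : (a, cnt a) ∈ (s0, cnt s0) :: srest.map (fun k => (k, cnt k)) := by
    have hmem : (a, cnt a) ∈ S.map (fun k => (k, cnt k)) := List.mem_map.mpr ⟨a, haS, rfl⟩
    rw [hScons, List.map_cons] at hmem
    exact hmem
  have hlex := hmall (a, cnt a) hya
  rw [hkb] at hlex
  simp only [lexLe] at hlex
  have hkbM : cnt kb ≤ M := hMmax kb hkbS
  rcases hlex with hlt | ⟨heq, hle⟩
  · -- cnt a < cnt kb contradicts maximality of M = cnt a
    rw [haM] at hlt; exact absurd hlt (not_lt.mpr hkbM)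
  · -- cnt kb = M, a ≤ kb; and kb ∈ C gives kb ≤ a
    have hkbC : kb ∈ C := (hCmem kb).mpr ⟨hkbS, heq ▸ haM⟩
    have : a = kb := le_antisymm hle (haMax kb hkbC)
    rw [hkb]
    exact this
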